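-- pv_equiv track=rewrite | github.com/Theo911/AEA_Sorting_Networks | batcher_odd_even_mergesort/batcher_odd_even_mergesort.py | odd_even_merge
-- ===== SOURCE A (Python) =====
-- from typing import List, Tuple
--
-- def odd_even_merge(lo: int, hi: int, r: int) -> List[Tuple[int, int]]:
--     """
--     Generate comparators for the odd-even merge operation.
--
--     Args:
--         lo: lower bound of range
--         hi: upper bound of range
--         r: step size
--
--     Returns:
--         List of (i,j) comparator pairs
--     """
--     comparators = []
--
--     # Base case: only one element
--     if hi - lo <= 1:
--         return []
--
--     # Recursive case
--     m = (lo + hi) // 2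
--
--     # Recursively merge two halves
--     comparators.extend(odd_even_merge(lo, m, r))
--     comparators.extend(odd_even_merge(m, hi, r))
--
--     # Create odd-even merge pattern
--     comparators.extend(odd_even_merge_compare(lo, hi, r))
--
--     return comparators
--
-- def odd_even_merge_compare(lo: int, hi: int, r: int) -> List[Tuple[int, int]]:
--     """
--     Generate comparators for comparing elements within an odd-even merge.
--
--     Args:
--         lo: lower bound of range
--         hi: upper bound of range
--         r: step size
--
--     Returns:
--         List of (i,j) comparator pairs
--     """
--     comparators = []
--
--     # Compare elements that are 'r' distance apart
--     d = r * 2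
--     if d < hi - lo:
--         for i in range(lo + r, hi - r, d):
--             comparators.append((i, i + r))
--
--     return comparators
-- ===== SOURCE B (Python) =====
-- from typing import List, Tuple
--
-- def odd_even_merge(lo: int, hi: int, r: int) -> List[Tuple[int, int]]:
--     """Iterative odd-even merge: explicit stack in post-order instead of recursion."""
--     comparators: List[Tuple[int, int]] = []
--     stack = [(lo, hi, False)]
--     while stack:
--         a, b, visited = stack.pop()
--         if visited:
--             d = r * 2
--             if d < b - a:
--                 comparators.extend((i, i + r) for i in range(a + r, b - r, d))
--         elif b - a > 1:
--             m = (a + b) // 2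
--             stack.append((a, b, True))
--             stack.append((m, b, False))
--             stack.append((a, m, False))
--     return comparators
-- ===== Notes on version B (the rewrite author's own statement) =====
-- stated objective: alternative
-- what changed: Replaces the recursive bisection with an iterative explicit-stack traversal (visited-flag post-order) that emits each interval's comparators after both halves, with the compare helper inlined.
import Mathlib
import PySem

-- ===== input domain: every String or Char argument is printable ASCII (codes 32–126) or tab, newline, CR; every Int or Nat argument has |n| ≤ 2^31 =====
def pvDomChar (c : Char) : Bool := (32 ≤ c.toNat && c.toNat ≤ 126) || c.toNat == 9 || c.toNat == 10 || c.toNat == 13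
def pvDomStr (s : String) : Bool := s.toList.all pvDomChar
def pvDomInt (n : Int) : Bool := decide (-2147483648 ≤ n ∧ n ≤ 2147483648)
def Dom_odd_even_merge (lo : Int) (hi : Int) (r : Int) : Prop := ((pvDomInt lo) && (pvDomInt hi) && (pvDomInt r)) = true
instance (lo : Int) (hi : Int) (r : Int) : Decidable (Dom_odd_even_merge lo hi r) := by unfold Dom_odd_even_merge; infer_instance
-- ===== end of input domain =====

-- B replaces A's recursion by an explicit-stack post-order loop (return value identical; no observable side effects).
-- Both ports carry a Nat fuel argument purely as a structural-recursion totality guard; the fuel bounds are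
-- sufficient on every input (proved in the fuel lemmas below), so neither port ever hits the fuel-exhausted branch.

-- ===== PORT A =====
-- helper odd_even_merge_compare, transliterated (the append loop over range(lo+r, hi-r, r*2))
def oem_compare (lo : Int) (hi : Int) (r : Int) : List (Int × Int) :=
  let d := r * 2
  if d < hi - lo then
    (PySem.List.pyRange (lo + r) (hi - r) d).foldl (fun acc i => acc ++ [(i, i + r)]) []
  else []

-- the recursion of A, structurally on the fuel (fuel ≥ hi - lo always suffices: both halves are strictly shorter)
def oemGoA (fuel : Nat) (lo : Int) (hi : Int) (r : Int) : List (Int × Int) :=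
  match fuel with
  | 0 => []
  | fuel + 1 =>
    if hi - lo ≤ 1 then []
    else
      let m := PySem.Int.floordiv (lo + hi) 2
      oemGoA fuel lo m r ++ oemGoA fuel m hi r ++ oem_compare lo hi r

def odd_even_merge (lo : Int) (hi : Int) (r : Int) : List (Int × Int) :=
  oemGoA (hi - lo).toNat lo hi r

-- ===== PORT B =====
-- the while loop over the explicit stack (head of the list = top of the stack = end of the Python list);
-- fuel counts loop iterations, 6*(hi-lo)+1 is enough (proved below)
def oemLoop (fuel : Nat) (r : Int) (stack : List (Int × Int × Bool)) (acc : List (Int × Int)) : List (Int × Int) :=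
  match fuel with
  | 0 => acc
  | fuel + 1 =>
    match stack with
    | [] => acc
    | (lo, hi, true) :: rest =>
      let d := r * 2
      oemLoop fuel r rest (acc ++ (if d < hi - lo then (PySem.List.pyRange (lo + r) (hi - r) d).map (fun i => (i, i + r)) else []))
    | (lo, hi, false) :: rest =>
      if hi - lo ≤ 1 then
        oemLoop fuel r rest acc
      else
        let m := PySem.Int.floordiv (lo + hi) 2
        oemLoop fuel r ((lo, m, false) :: (m, hi, false) :: (lo, hi, true) :: rest) acc

def odd_even_merge_alt (lo : Int) (hi : Int) (r : Int) : List (Int × Int) :=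
  oemLoop (6 * (hi - lo).toNat + 1) r [(lo, hi, false)] []

-- ===== PRECONDITION & SPEC =====
-- Pre_ excludes exactly r = 0 with hi - lo > 1: there Python's range(..., step=0) raises ValueError
-- (in both A and B), so A returns no value.
def Pre_odd_even_merge (lo : Int) (hi : Int) (r : Int) : Prop := r ≠ 0 ∨ hi - lo ≤ 1
instance (lo : Int) (hi : Int) (r : Int) : Decidable (Pre_odd_even_merge lo hi r) := by unfold Pre_odd_even_merge; infer_instance
def pvWitness_odd_even_merge : Int × Int × Int := (0, 8, 1)

def Spec_odd_even_merge (lo : Int) (hi : Int) (r : Int) (out : List (Int × Int)) : Prop := out = odd_even_merge_alt lo hi r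
instance (lo : Int) (hi : Int) (r : Int) (out : List (Int × Int)) : Decidable (Spec_odd_even_merge lo hi r out) := by unfold Spec_odd_even_merge; infer_instance

-- ===== CLAIM (what is proved, stated in full; the proofs are below) =====
def Claim_equal_odd_even_merge : Prop := ∀ (lo : Int) (hi : Int) (r : Int), Dom_odd_even_merge lo hi r → Pre_odd_even_merge lo hi r → Spec_odd_even_merge lo hi r (odd_even_merge lo hi r)

-- ===== LEMMAS AND PROOFS =====

-- midpoint bounds, shared by all the fuel arithmetic below
theorem oem_mid_bounds {lo hi : Int} (h : ¬ hi - lo ≤ 1) :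
    lo < PySem.Int.floordiv (lo + hi) 2 ∧ PySem.Int.floordiv (lo + hi) 2 < hi := by
  rw [PySem.Int.floordiv_eq_ediv_of_pos (by omega : (0:Int) < 2)]
  omega

-- the fuel of oemGoA is irrelevant once it is at least hi - lo
theorem oemGoA_fuel_irrel (r : Int) :
    ∀ (f f' : Nat) (lo hi : Int), (hi - lo).toNat ≤ f → (hi - lo).toNat ≤ f' →
      oemGoA f lo hi r = oemGoA f' lo hi r := by
  intro f
  induction f using Nat.strong_induction_on with
  | _ f ih =>
    intro f' lo hi hf hf'
    match f, f' with
    | 0, 0 => rfl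
    | 0, g + 1 =>
      have hle : hi - lo ≤ 1 := by omega
      simp [oemGoA, hle]
    | g + 1, 0 =>
      have hle : hi - lo ≤ 1 := by omega
      simp [oemGoA, hle]
    | g + 1, g' + 1 =>
      simp only [oemGoA]
      split
      · rfl
      · next h =>
        obtain ⟨h1, h2⟩ := oem_mid_bounds h
        rw [ih g (by omega) g' lo _ (by omega) (by omega),
            ih g (by omega) g' _ hi (by omega) (by omega)]

-- unfolding equation of port A at its stated fuel
theorem odd_even_merge_unfold (lo hi r : Int) :
    odd_even_merge lo hi r =
      if hi - lo ≤ 1 then []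
      else
        odd_even_merge lo (PySem.Int.floordiv (lo + hi) 2) r
          ++ odd_even_merge (PySem.Int.floordiv (lo + hi) 2) hi r
          ++ oem_compare lo hi r := by
  unfold odd_even_merge
  by_cases h : hi - lo ≤ 1
  · have h0 : (hi - lo).toNat = 0 ∨ (hi - lo).toNat = 1 := by omega
    rcases h0 with h0 | h0 <;> simp [h0, oemGoA, h]
  · obtain ⟨h1, h2⟩ := oem_mid_bounds h
    have hn : (hi - lo).toNat = ((hi - lo).toNat - 1) + 1 := by omega
    rw [hn]
    simp only [oemGoA, if_neg h]
    rw [oemGoA_fuel_irrel r _ ((PySem.Int.floordiv (lo + hi) 2) - lo).toNat lo _ (by omega) (by omega),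
        oemGoA_fuel_irrel r _ (hi - (PySem.Int.floordiv (lo + hi) 2)).toNat _ hi (by omega) (by omega)]

-- iteration budget of one stack entry
def oemNeed (e : Int × Int × Bool) : Nat :=
  match e with
  | (_, _, true) => 1
  | (lo, hi, false) => 6 * (hi - lo).toNat - 4 + 1

-- the meaning of one stack entry in terms of A's functions
def oemSpec (r : Int) (e : Int × Int × Bool) : List (Int × Int) :=
  if e.2.2 then oem_compare e.1 e.2.1 r else odd_even_merge e.1 e.2.1 r

-- A's compare helper computes the map over the range (its foldl-append loop)
theorem oem_compare_eq_map (lo hi r : Int) :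
    oem_compare lo hi r =
      (if r * 2 < hi - lo then (PySem.List.pyRange (lo + r) (hi - r) (r * 2)).map (fun i => (i, i + r)) else []) := by
  simp only [oem_compare]
  split
  · have h1 := PySem.List.foldl_append_singleton_eq_map (fun i : Int => (i, i + r))
      (PySem.List.pyRange (lo + r) (hi - r) (r * 2)) []
    simpa using h1
  · rfl

-- loop invariant: with enough fuel the loop appends, in order, the meaning of every stack entry
theorem oemLoop_eq (r : Int) :
    ∀ (fuel : Nat) (stack : List (Int × Int × Bool)) (acc : List (Int × Int)),
      (stack.map oemNeed).sum ≤ fuel →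
      oemLoop fuel r stack acc = acc ++ (stack.map (oemSpec r)).flatten := by
  intro fuel
  induction fuel with
  | zero =>
    intro stack acc hf
    match stack with
    | [] => simp [oemLoop]
    | (lo, hi, b) :: rest =>
      exfalso
      have : 1 ≤ oemNeed (lo, hi, b) := by cases b <;> simp [oemNeed]
      simp only [List.map_cons, List.sum_cons] at hf
      omega
  | succ fuel ih =>
    intro stack acc hf
    match stack with
    | [] => simp [oemLoop]
    | (lo, hi, true) :: rest =>
      simp only [List.map_cons, List.sum_cons, oemNeed] at hf
      rw [oemLoop, ih rest _ (by omega)]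
      simp [oemSpec, oem_compare_eq_map]
    | (lo, hi, false) :: rest =>
      simp only [List.map_cons, List.sum_cons, oemNeed] at hf
      rw [oemLoop]
      by_cases h : hi - lo ≤ 1
      · rw [if_pos h, ih rest _ (by omega)]
        have hz : odd_even_merge lo hi r = [] := by
          rw [odd_even_merge_unfold, if_pos h]
        simp [oemSpec, hz]
      · rw [if_neg h]
        obtain ⟨h1, h2⟩ := oem_mid_bounds h
        rw [ih _ _ (by
          simp only [List.map_cons, List.sum_cons, oemNeed]
          omega)]
        have hA : odd_even_merge lo hi r =
            odd_even_merge lo (PySem.Int.floordiv (lo + hi) 2) r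
              ++ odd_even_merge (PySem.Int.floordiv (lo + hi) 2) hi r
              ++ oem_compare lo hi r := by
          rw [odd_even_merge_unfold, if_neg h]
        simp [oemSpec, hA]

-- ===== VERDICT (by name: the statement is the Claim_ definition above) =====
theorem odd_even_merge_spec : Claim_equal_odd_even_merge := by
  intro lo hi r _ _
  unfold Spec_odd_even_merge odd_even_merge_alt
  rw [oemLoop_eq r _ _ _ (by simp only [List.map_cons, List.map_nil, List.sum_cons, List.sum_nil, oemNeed]; omega)]
  simp [oemSpec]
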